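-- pv_equiv track=rewrite | github.com/Rye-lxy/Caspeak | bin/plotter.py | expandedSeqDict
-- ===== SOURCE A (Python) =====
-- def expandedSeqDict(seqDict):
--     '''Allow lookup by short sequence names, e.g. chr7 as well as hg19.chr7.'''
--     newDict = seqDict.copy()
--     for name, x in seqDict.items():
--         if "." in name:
--             base = name.split(".", 1)[-1]
--             if base in newDict:  # an ambiguous case was found:
--                 return seqDict   # so give up completely
--             newDict[base] = x
--     return newDict
-- ===== SOURCE B (Python) =====
-- def expandedSeqDict(seqDict):
--     '''Allow lookup by short sequence names, e.g. chr7 as well as hg19.chr7.'''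
--     names = list(seqDict) + [n.split(".", 1)[-1] for n in seqDict if "." in n]
--     if len(set(names)) < len(names):  # some short name clashes: give up completely
--         return seqDict
--     merged = seqDict.copy()
--     merged.update((n.split(".", 1)[-1], x) for n, x in seqDict.items() if "." in n)
--     return merged
-- ===== Notes on version B (the rewrite author's own statement) =====
-- stated objective: alternative
-- what changed: B replaces A's stateful scan (grow a copy, membership-test each short name against it, early-return from inside the loop) by a stateless cardinality argument: it builds the combined list of original names and all short names and detects ambiguity in one shot via len(set(names)) < len(names); only if that global duplicate check passes does it build the merged dict in a single update, with no membership test or early exit anywhere.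
import Mathlib
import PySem

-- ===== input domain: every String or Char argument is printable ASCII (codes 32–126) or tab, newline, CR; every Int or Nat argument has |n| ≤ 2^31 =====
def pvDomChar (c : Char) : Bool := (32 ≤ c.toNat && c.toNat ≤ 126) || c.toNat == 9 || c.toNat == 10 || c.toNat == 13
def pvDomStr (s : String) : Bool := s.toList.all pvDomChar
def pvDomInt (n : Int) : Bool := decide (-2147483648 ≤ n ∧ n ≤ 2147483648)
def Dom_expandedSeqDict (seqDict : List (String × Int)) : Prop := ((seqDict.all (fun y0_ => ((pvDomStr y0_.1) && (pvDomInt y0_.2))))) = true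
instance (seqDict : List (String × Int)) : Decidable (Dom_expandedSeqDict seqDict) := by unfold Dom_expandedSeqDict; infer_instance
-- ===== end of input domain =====

-- B detects ambiguity globally by a set-cardinality duplicate check on originals+short names,
-- then builds the merged dict in one unconditional update — instead of A's stateful scan with
-- a membership test and early return inside the build loop (objective: alternative).


-- ===== PORT A =====
-- the loop body of A: iterate the dict's items, inserting aliases into newDict,
-- giving up (returning the original dict) on the first ambiguous base
def expandedSeqDictLoop (orig : PySem.Dict String Int) :
    List (String × Int) → PySem.Dict String Int → PySem.Dict String Int
  | [], nd => nd
  | (name, x) :: rest, nd =>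
    if PySem.Str.isIn "." name then
      let base := (PySem.List.pyGet? ((PySem.Str.splitMax? name "." 1).getD []) (-1)).getD ""
      if nd.contains base then orig
      else expandedSeqDictLoop orig rest (nd.insert base x)
    else expandedSeqDictLoop orig rest nd

def expandedSeqDict (seqDict : List (String × Int)) : List (String × Int) :=
  let d := PySem.Dict.ofList seqDict
  (expandedSeqDictLoop d d.items d).items

-- ===== PORT B =====
-- name.split(".", 1)[-1]
def pvBase (name : String) : String :=
  (PySem.List.pyGet? ((PySem.Str.splitMax? name "." 1).getD []) (-1)).getD ""

-- the pair (base, x) contributed by one item, if its name contains '.'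
def pvAlias (p : String × Int) : Option (String × Int) :=
  if PySem.Str.isIn "." p.1 then some (pvBase p.1, p.2) else none

def expandedSeqDict_alt (seqDict : List (String × Int)) : List (String × Int) :=
  let d := PySem.Dict.ofList seqDict
  -- names = list(seqDict) + [short names]
  let names := PySem.Dict.keys d ++
    d.items.filterMap (fun p => if PySem.Str.isIn "." p.1 then some (pvBase p.1) else none)
  -- duplicate check by set cardinality: len(set(names)) < len(names)
  if (PySem.Set.ofList names).length < names.length then d.items
  else
    -- merged = seqDict.copy(); merged.update(generator of (base, x) pairs)
    ((d.items.filterMap pvAlias).foldl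
      (fun (m : PySem.Dict String Int) p => m.insert p.1 p.2) d).items

-- ===== PRECONDITION & SPEC =====
def Spec_expandedSeqDict (seqDict : List (String × Int)) (out : List (String × Int)) : Prop := out = expandedSeqDict_alt seqDict
instance (seqDict : List (String × Int)) (out : List (String × Int)) : Decidable (Spec_expandedSeqDict seqDict out) := by unfold Spec_expandedSeqDict; infer_instance

-- ===== CLAIM (what is proved, stated in full; the proofs are below) =====
def Claim_equal_expandedSeqDict : Prop := ∀ (seqDict : List (String × Int)), Dom_expandedSeqDict seqDict → Spec_expandedSeqDict seqDict (expandedSeqDict seqDict)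

-- ===== LEMMAS AND PROOFS =====

-- proof-side: the validation A's loop performs, abstracted to a pure predicate
def pvOk : List (String × Int) → PySem.Set String → Bool
  | [], _ => true
  | (b, _) :: rest, seen =>
    if PySem.Set.contains seen b then false else pvOk rest (PySem.Set.add seen b)

lemma seen_insert {seen : PySem.Set String} {nd : PySem.Dict String Int} {b : String} {x : Int}
    (hag : ∀ s, s ∈ seen ↔ nd.contains s = true) :
    ∀ s, s ∈ PySem.Set.add seen b ↔ (nd.insert b x).contains s = true := by
  intro s
  rw [PySem.Set.mem_add, PySem.Dict.contains_insert]
  by_cases hs : s = b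
  · subst hs; simp
  · simp [hs, hag s]

lemma loopA_eq (d : PySem.Dict String Int) :
    ∀ (l : List (String × Int)) (nd : PySem.Dict String Int) (seen : PySem.Set String),
      (∀ s, s ∈ seen ↔ nd.contains s = true) →
      (expandedSeqDictLoop d l nd).items =
        if pvOk (l.filterMap pvAlias) seen then
          ((l.filterMap pvAlias).foldl (fun m (p : String × Int) => m.insert p.1 p.2) nd).items
        else d.items := by
  intro l
  induction l with
  | nil => intro nd seen _; simp [expandedSeqDictLoop, pvOk]
  | cons p rest ih =>
    intro nd seen hag
    obtain ⟨name, x⟩ := p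
    by_cases hdot : PySem.Chars.isIn ['.'] name.toList = true
    · have hfm : (((name, x) :: rest).filterMap pvAlias) = (pvBase name, x) :: rest.filterMap pvAlias := by
        simp [pvAlias, PySem.Str.isIn, hdot]
      by_cases hc : nd.contains (pvBase name) = true
      · have hsc : pvBase name ∈ seen := (hag _).2 hc
        have hA : expandedSeqDictLoop d ((name, x) :: rest) nd = d := by
          simp [expandedSeqDictLoop, PySem.Str.isIn, hdot, pvBase] at hc ⊢
          simp [hc]
        rw [hfm, hA]
        simp [pvOk, hsc]
      · simp only [Bool.not_eq_true] at hc
        have hsc : pvBase name ∉ seen := fun hmem => by have := (hag _).1 hmem; simp [hc] at this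
        have hA : expandedSeqDictLoop d ((name, x) :: rest) nd
            = expandedSeqDictLoop d rest (nd.insert (pvBase name) x) := by
          simp [expandedSeqDictLoop, PySem.Str.isIn, hdot, pvBase] at hc ⊢
          simp [hc]
        rw [hfm, hA, ih (nd.insert (pvBase name) x) (PySem.Set.add seen (pvBase name)) (seen_insert hag)]
        simp [pvOk, hsc]
    · have hfm : (((name, x) :: rest).filterMap pvAlias) = rest.filterMap pvAlias := by
        simp [pvAlias, PySem.Str.isIn, hdot]
      have hA : expandedSeqDictLoop d ((name, x) :: rest) nd = expandedSeqDictLoop d rest nd := by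
        simp [expandedSeqDictLoop, PySem.Str.isIn, hdot]
      rw [hfm, hA, ih nd seen hag]

-- pvOk succeeds iff the bases are pairwise distinct and avoid the initial seen-set
lemma pvOk_iff : ∀ (bl : List (String × Int)) (seen : PySem.Set String),
    pvOk bl seen = true ↔ (bl.map Prod.fst).Nodup ∧ ∀ b ∈ bl.map Prod.fst, b ∉ seen := by
  intro bl
  induction bl with
  | nil => intro seen; simp [pvOk]
  | cons p rest ih =>
    intro seen
    obtain ⟨b, x⟩ := p
    by_cases h : b ∈ seen
    · simp [pvOk, h]
    · simp only [pvOk, PySem.Set.contains_iff]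
      rw [if_neg (by simpa using h), ih]
      simp only [List.map_cons, List.nodup_cons, List.mem_cons]
      constructor
      · rintro ⟨hn, hall⟩
        have hb : b ∉ rest.map Prod.fst := fun hm => by
          have := hall _ hm; rw [PySem.Set.mem_add] at this; exact this (Or.inr rfl)
        refine ⟨⟨hb, hn⟩, ?_⟩
        rintro c (rfl | hc)
        · exact h
        · intro hcs
          have := hall _ hc
          rw [PySem.Set.mem_add] at this
          exact this (Or.inl hcs)
      · rintro ⟨⟨hb, hn⟩, hall⟩
        refine ⟨hn, fun c hc => ?_⟩
        rw [PySem.Set.mem_add]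
        rintro (hcs | rfl)
        · exact hall _ (Or.inr hc) hcs
        · exact hb hc

-- len(set(l)) = len(l) exactly when l has no duplicates
lemma ofList_length_eq_iff : ∀ (l : List String),
    (PySem.Set.ofList l).length = l.length ↔ l.Nodup := by
  intro l
  induction l with
  | nil => simp
  | cons x xs ih =>
    rw [PySem.Set.ofList_cons]
    by_cases h : x ∈ xs
    · have hx : x ∈ PySem.Set.ofList xs := (PySem.Set.mem_ofList xs x).2 h
      have hlt : (PySem.Set.discard (PySem.Set.ofList xs) x).length < (PySem.Set.ofList xs).length := by
        unfold PySem.Set.discard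
        exact List.length_filter_lt_length_iff_exists.2 ⟨x, hx, by simp⟩
      have := PySem.Set.length_ofList_le (xs := xs)
      simp only [List.length_cons, List.nodup_cons]
      constructor
      · intro he; omega
      · rintro ⟨hx', _⟩; exact absurd h hx'
    · have hd : PySem.Set.discard (PySem.Set.ofList xs) x = PySem.Set.ofList xs := by
        unfold PySem.Set.discard
        apply List.filter_eq_self.2
        intro a ha
        have : a ∈ xs := (PySem.Set.mem_ofList xs a).1 ha
        simp only [Bool.not_eq_eq_eq_not, Bool.not_true, beq_eq_false_iff_ne]
        exact fun hax => h (hax ▸ this)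
      rw [hd]
      simp only [List.length_cons, List.nodup_cons, Nat.add_right_cancel_iff, ih]
      tauto

-- the base names contributed by the items, as a projection of the alias pairs
lemma map_fst_filterMap_pvAlias (l : List (String × Int)) :
    (l.filterMap pvAlias).map Prod.fst =
      l.filterMap (fun p => if PySem.Str.isIn "." p.1 then some (pvBase p.1) else none) := by
  rw [List.map_filterMap]
  congr 1
  funext p
  unfold pvAlias
  split_ifs <;> rfl

-- ===== VERDICT (by name: the statement is the Claim_ definition above) =====
theorem expandedSeqDict_spec : Claim_equal_expandedSeqDict := by
  intro seqDict _
  unfold Spec_expandedSeqDict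
  simp only [expandedSeqDict, expandedSeqDict_alt]
  set d := PySem.Dict.ofList seqDict with hd
  rw [loopA_eq d d.items d (PySem.Set.ofList (PySem.Dict.keys d))
    (fun s => by rw [PySem.Set.mem_ofList, PySem.Dict.contains_iff_mem_keys])]
  set bases := d.items.filterMap (fun p => if PySem.Str.isIn "." p.1 then some (pvBase p.1) else none) with hbases
  have hkn : (PySem.Dict.keys d).Nodup := by rw [hd]; exact PySem.Dict.nodup_keys_ofList seqDict
  have hcond : pvOk (d.items.filterMap pvAlias) (PySem.Set.ofList (PySem.Dict.keys d)) = true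
      ↔ ¬ ((PySem.Set.ofList (PySem.Dict.keys d ++ bases)).length < (PySem.Dict.keys d ++ bases).length) := by
    rw [pvOk_iff, map_fst_filterMap_pvAlias, ← hbases]
    have hle := PySem.Set.length_ofList_le (xs := PySem.Dict.keys d ++ bases)
    constructor
    · intro ⟨hn, hall⟩
      have : (PySem.Dict.keys d ++ bases).Nodup := by
        rw [List.nodup_append]
        refine ⟨hkn, hn, ?_⟩
        intro a ha b hb hab
        exact (hall b hb) ((PySem.Set.mem_ofList _ _).2 (hab ▸ ha))
      have := (ofList_length_eq_iff _).2 this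
      omega
    · intro he
      have heq : (PySem.Set.ofList (PySem.Dict.keys d ++ bases)).length = (PySem.Dict.keys d ++ bases).length := by omega
      have hn := (ofList_length_eq_iff _).1 heq
      rw [List.nodup_append] at hn
      refine ⟨hn.2.1, fun b hb hbs => ?_⟩
      exact hn.2.2 b ((PySem.Set.mem_ofList _ _).1 hbs) b hb rfl
  by_cases hok : pvOk (d.items.filterMap pvAlias) (PySem.Set.ofList (PySem.Dict.keys d)) = true
  · rw [if_pos hok, if_neg (hcond.1 hok)]
  · rw [if_neg hok]
    have : (PySem.Set.ofList (PySem.Dict.keys d ++ bases)).length < (PySem.Dict.keys d ++ bases).length := by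
      by_contra hc
      exact hok (hcond.2 hc)
    rw [if_pos this]
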